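-- pv_equiv track=rewrite | github.com/maniekb/PitE-Project | kryptonite/dataservice/bitfinex/bitfinex_client.py | _approximate_missing_intervals
-- ===== SOURCE A (Python) =====
-- def _approximate_missing_intervals(data, start, end, interval_milis):
--     new_data = [dat.copy() for dat in data]
--     current = start
--     i = 0
--     while new_data and current <= end:
--         if not i < len(new_data):
--             elem = new_data[i - 1].copy()
--             elem[0] = current
--             new_data.append(elem)
--         elif new_data[i][0] != current:
--             elem = new_data[i].copy()
--             elem[0] = current
--             new_data.insert(i, elem)
--         current += interval_milis
--         i += 1
--     return new_data
-- ===== SOURCE B (Python) =====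
-- def _approximate_missing_intervals(data, start, end, interval_milis):
--     if not data:
--         return []
--     out = []
--     j = 0
--     current = start
--     while current <= end:
--         if j < len(data):
--             row = data[j]
--             if row[0] == current:
--                 out.append(row.copy())
--                 j += 1
--             else:
--                 elem = row.copy()
--                 elem[0] = current
--                 out.append(elem)
--         else:
--             elem = out[-1].copy()
--             elem[0] = current
--             out.append(elem)
--         current += interval_milis
--     out.extend(row.copy() for row in data[j:])
--     return out
-- ===== Notes on version B (the rewrite author's own statement) =====
-- stated objective: alternative
-- what changed: Instead of walking an index over the copied input list and splicing missing-interval rows into it with list.insert, B makes a single pass over the timestamp grid with a pointer into the original data, appending every output row to a fresh list and tacking on the unconsumed tail at the end.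
import Mathlib
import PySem

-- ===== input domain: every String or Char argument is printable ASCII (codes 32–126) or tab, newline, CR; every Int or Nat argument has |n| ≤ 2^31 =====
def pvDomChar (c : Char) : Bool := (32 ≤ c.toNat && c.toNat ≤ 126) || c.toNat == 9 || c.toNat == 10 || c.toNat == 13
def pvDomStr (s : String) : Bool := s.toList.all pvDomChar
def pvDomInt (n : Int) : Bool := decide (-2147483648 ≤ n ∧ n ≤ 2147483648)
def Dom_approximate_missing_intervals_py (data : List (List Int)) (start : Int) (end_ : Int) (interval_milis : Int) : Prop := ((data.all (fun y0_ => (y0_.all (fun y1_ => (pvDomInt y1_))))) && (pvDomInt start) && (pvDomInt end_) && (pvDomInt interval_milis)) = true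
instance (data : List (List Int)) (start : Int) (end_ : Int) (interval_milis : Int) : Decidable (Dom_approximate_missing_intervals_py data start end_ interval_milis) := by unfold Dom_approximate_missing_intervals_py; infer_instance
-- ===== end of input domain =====

-- B replaces A's index-walk with in-place inserts into the growing list by a single pass that
-- appends to a fresh output list with a pointer into the original data (objective: alternative).

-- ===== PORT A =====
-- Python `elem[0] = current`; Python raises IndexError on an empty row (excluded by Pre_).
def pySetHead (l : List Int) (v : Int) : List Int :=
  match l with
  | [] => []
  | _ :: t => v :: t

-- A's while loop. The `interval ≤ 0` guard only makes the recursion total: where it fires with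
-- the loop still running, the Python loops forever (excluded by Pre_).
def loopA_approx (new_data : List (List Int)) (current : Int) (i : Nat)
    (end_ interval : Int) : List (List Int) :=
  if _h0 : interval ≤ 0 then new_data
  else if h1 : new_data ≠ [] ∧ current ≤ end_ then
    if i < new_data.length then
      if PySem.List.pyGet? (new_data.getD i []) 0 ≠ some current then
        loopA_approx (new_data.insertIdx i (pySetHead (new_data.getD i []) current))
          (current + interval) (i + 1) end_ interval
      else
        loopA_approx new_data (current + interval) (i + 1) end_ interval
    else
      loopA_approx (new_data ++ [pySetHead (new_data.getD (i - 1) []) current])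
        (current + interval) (i + 1) end_ interval
  else new_data
termination_by (end_ + interval - current).toNat
decreasing_by all_goals (obtain ⟨h1a, h1b⟩ := h1; omega)

def approximate_missing_intervals_py (data : List (List Int)) (start : Int) (end_ : Int) (interval_milis : Int) : List (List Int) :=
  loopA_approx data start 0 end_ interval_milis

-- ===== PORT B =====
-- B's while loop: pointer j into data, output accumulated in out. Same totality guard.
def loopB_approx (data : List (List Int)) (j : Nat) (out : List (List Int))
    (current end_ interval : Int) : List (List Int) :=
  if _h0 : interval ≤ 0 then out ++ data.drop j
  else if h1 : current ≤ end_ then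
    if j < data.length then
      if PySem.List.pyGet? (data.getD j []) 0 = some current then
        loopB_approx data (j + 1) (out ++ [data.getD j []]) (current + interval) end_ interval
      else
        loopB_approx data j (out ++ [pySetHead (data.getD j []) current]) (current + interval) end_ interval
    else
      loopB_approx data j (out ++ [pySetHead (out.getLastD []) current]) (current + interval) end_ interval
  else out ++ data.drop j
termination_by (end_ + interval - current).toNat
decreasing_by all_goals omega

def approximate_missing_intervals_py_alt (data : List (List Int)) (start : Int) (end_ : Int) (interval_milis : Int) : List (List Int) :=
  if data = [] then [] else loopB_approx data 0 [] start end_ interval_milis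

-- ===== PRECONDITION & SPEC =====
-- rowsOkPre scans the rows the timestamp loop will actually examine: with the next grid point
-- `current`, a row is examined only while `current ≤ end_`; an examined row must be nonempty
-- (Python reads row[0], IndexError otherwise); the pointer moves past a row exactly when its
-- head is a reachable grid point (current ≤ head ≤ end_, head ≡ current mod interval), and
-- rows beyond a non-matching row are never examined.
def rowsOkPre (current end_ interval : Int) : List (List Int) → Bool
  | [] => true
  | row :: rest =>
    if current ≤ end_ then
      match row with
      | [] => false
      | h :: _ =>
        if current ≤ h ∧ h ≤ end_ ∧ (h - current) % interval = 0 then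
          rowsOkPre (h + interval) end_ interval rest
        else true
    else true

-- Pre_ excludes exactly the inputs where the Python A does not return normally: a non-positive
-- interval while the loop still runs (infinite loop), and an empty row at a position the loop
-- actually examines (IndexError on row[0]); B's Python raises/diverges at the very same inputs.
def Pre_approximate_missing_intervals_py (data : List (List Int)) (start : Int) (end_ : Int) (interval_milis : Int) : Prop :=
  data = [] ∨ end_ < start ∨ (0 < interval_milis ∧ rowsOkPre start end_ interval_milis data = true)
instance (data : List (List Int)) (start : Int) (end_ : Int) (interval_milis : Int) : Decidable (Pre_approximate_missing_intervals_py data start end_ interval_milis) := by unfold Pre_approximate_missing_intervals_py; infer_instance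

def pvWitness_approximate_missing_intervals_py : List (List Int) × Int × Int × Int :=
  ([[0, 5], [2, 6]], 0, 3, 1)

def Spec_approximate_missing_intervals_py (data : List (List Int)) (start : Int) (end_ : Int) (interval_milis : Int) (out : List (List Int)) : Prop := out = approximate_missing_intervals_py_alt data start end_ interval_milis
instance (data : List (List Int)) (start : Int) (end_ : Int) (interval_milis : Int) (out : List (List Int)) : Decidable (Spec_approximate_missing_intervals_py data start end_ interval_milis out) := by unfold Spec_approximate_missing_intervals_py; infer_instance

-- ===== CLAIM (what is proved, stated in full; the proofs are below) =====
def Claim_equal_approximate_missing_intervals_py : Prop := ∀ (data : List (List Int)) (start : Int) (end_ : Int) (interval_milis : Int), Dom_approximate_missing_intervals_py data start end_ interval_milis → Pre_approximate_missing_intervals_py data start end_ interval_milis → Spec_approximate_missing_intervals_py data start end_ interval_milis (approximate_missing_intervals_py data start end_ interval_milis)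

-- ===== LEMMAS AND PROOFS =====

lemma insertIdx_at_length {α : Type} (l1 l2 : List α) (a : α) :
    (l1 ++ l2).insertIdx l1.length a = l1 ++ a :: l2 := by
  induction l1 with
  | nil => rfl
  | cons x t ih => simp [List.insertIdx_succ_cons, ih]

lemma getD_append_length {α : Type} [Inhabited α] (l1 l2 : List α) (d : α) :
    (l1 ++ l2).getD l1.length d = l2.getD 0 d := by
  induction l1 with
  | nil => rfl
  | cons x t ih => simpa using ih

lemma getD_last {α : Type} [Inhabited α] (l : List α) (h : l ≠ []) (d : α) :
    l.getD (l.length - 1) d = l.getLastD d := by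
  induction l with
  | nil => simp at h
  | cons x t ih =>
    cases t with
    | nil => rfl
    | cons y s => simpa using ih (by simp)

lemma drop_getD_zero {α : Type} [Inhabited α] (l : List α) (j : Nat) (d : α) :
    (l.drop j).getD 0 d = l.getD j d := by
  simp [List.getD, List.getElem?_drop]

lemma drop_cons_of_lt {α : Type} (l : List α) (j : Nat) (h : j < l.length) (d : α) :
    l.drop j = l.getD j d :: l.drop (j + 1) := by
  rw [List.drop_eq_getElem_cons h]
  simp [List.getD, List.getElem?_eq_getElem h]

lemma loopAB_eq (data out : List (List Int)) (j : Nat) (current end_ interval : Int)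
    (hd : data ≠ []) (hj : j ≤ data.length) (h0 : out = [] → j = 0) :
    loopA_approx (out ++ data.drop j) current out.length end_ interval
      = loopB_approx data j out current end_ interval := by
  have hne : out ++ data.drop j ≠ [] := by
    cases out with
    | nil => simpa [h0 rfl] using hd
    | cons x t => simp
  rw [loopA_approx, loopB_approx]
  by_cases hiv : interval ≤ 0
  · simp [hiv]
  · simp only [dif_neg hiv]
    by_cases hc : current ≤ end_
    · simp only [dif_pos (And.intro hne hc), dif_pos hc]
      have hlen : (out ++ data.drop j).length = out.length + (data.length - j) := by
        simp
      by_cases hjl : j < data.length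
      · have hilt : out.length < (out ++ data.drop j).length := by omega
        have hget : (out ++ data.drop j).getD out.length [] = data.getD j [] := by
          rw [getD_append_length, drop_getD_zero]
        simp only [if_pos hilt, if_pos hjl, hget]
        by_cases hm : PySem.List.pyGet? (data.getD j []) 0 = some current
        · rw [if_neg (show ¬(PySem.List.pyGet? (data.getD j []) 0 ≠ some current) from by
            simpa using hm), if_pos hm]
          have hdrop : data.drop j = data.getD j [] :: data.drop (j + 1) :=
            drop_cons_of_lt data j hjl []
          have : out ++ data.drop j = (out ++ [data.getD j []]) ++ data.drop (j + 1) := by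
            rw [hdrop]; simp
          rw [this]
          have hl : (out ++ [data.getD j []]).length = out.length + 1 := by simp
          rw [← hl]
          exact loopAB_eq data (out ++ [data.getD j []]) (j + 1) (current + interval)
            end_ interval hd (by omega) (by simp)
        · rw [if_pos (show PySem.List.pyGet? (data.getD j []) 0 ≠ some current from hm),
            if_neg hm]
          have hins : (out ++ data.drop j).insertIdx out.length (pySetHead (data.getD j []) current)
              = (out ++ [pySetHead (data.getD j []) current]) ++ data.drop j := by
            rw [insertIdx_at_length]; simp
          rw [hins]
          have hl : (out ++ [pySetHead (data.getD j []) current]).length = out.length + 1 := by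
            simp
          rw [← hl]
          exact loopAB_eq data (out ++ [pySetHead (data.getD j []) current]) j
            (current + interval) end_ interval hd hj (by simp)
      · -- j = data.length : appended region
        have hjd : j = data.length := by omega
        have hdropnil : data.drop j = ([] : List (List Int)) := by
          simp [hjd]
        have houtne : out ≠ [] := by
          intro h
          have hz := h0 h
          have hp : 0 < data.length := List.length_pos_of_ne_nil hd
          omega
        have hnlt : ¬ out.length < (out ++ data.drop j).length := by
          rw [hlen]; omega
        simp only [if_neg hnlt, if_neg hjl]
        have hgl : (out ++ data.drop j).getD (out.length - 1) [] = out.getLastD [] := by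
          rw [hdropnil, List.append_nil, getD_last out houtne]
        rw [hgl, hdropnil, List.append_nil]
        have hrec := loopAB_eq data (out ++ [pySetHead (out.getLastD []) current]) j
          (current + interval) end_ interval hd hj (by simp)
        rw [hdropnil, List.append_nil] at hrec
        have hl : (out ++ [pySetHead (out.getLastD []) current]).length = out.length + 1 := by
          simp
        rw [← hl]
        exact hrec
    · simp [hc, hne]
termination_by (end_ + interval - current).toNat
decreasing_by all_goals omega

lemma loopA_nil (current : Int) (i : Nat) (end_ interval : Int) :
    loopA_approx [] current i end_ interval = [] := by
  rw [loopA_approx]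
  by_cases hiv : interval ≤ 0 <;> simp [hiv]

-- ===== VERDICT (by name: the statement is the Claim_ definition above) =====
theorem approximate_missing_intervals_py_spec : Claim_equal_approximate_missing_intervals_py := by
  intro data start end_ interval_milis _hDom _hPre
  unfold Spec_approximate_missing_intervals_py approximate_missing_intervals_py
    approximate_missing_intervals_py_alt
  by_cases hd : data = []
  · subst hd; simp [loopA_nil]
  · rw [if_neg hd]
    have := loopAB_eq data [] 0 start end_ interval_milis hd (by omega) (fun _ => rfl)
    simpa using this
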